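-- pv_equiv track=rewrite | github.com/Simonsays095/advent_of_code | 2021/day_8/part_2_reattempt.py | whittle_options
-- ===== SOURCE A (Python) =====
-- def whittle_options(known):
--     '''
--     remove known wires from other wires
--     '''
--     deduced = [val for val in known.values() if len(val) == 1]
--     for key, value in known.items():
--         if len(value) == 1: continue
--         for d in deduced:
--             if d in value:
--                 value = value.replace(d, "")
--         known[key] = value
--     return known
-- ===== SOURCE B (Python) =====
-- def whittle_options(known):
--     '''
--     remove known wires from other wires
--     '''
--     deduced = {v for v in known.values() if len(v) == 1}
--     for key, value in known.items():
--         if len(value) != 1: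
--             known[key] = ''.join(c for c in value if c not in deduced)
--     return known
-- ===== Notes on version B (the rewrite author's own statement) =====
-- stated objective: simpler
-- what changed: Replaces the nested loop over deduced wires with repeated str.replace calls by one character-level scan of each value against a set of deduced single-char wires, rebuilt with a join of a comprehension.
import Mathlib
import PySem

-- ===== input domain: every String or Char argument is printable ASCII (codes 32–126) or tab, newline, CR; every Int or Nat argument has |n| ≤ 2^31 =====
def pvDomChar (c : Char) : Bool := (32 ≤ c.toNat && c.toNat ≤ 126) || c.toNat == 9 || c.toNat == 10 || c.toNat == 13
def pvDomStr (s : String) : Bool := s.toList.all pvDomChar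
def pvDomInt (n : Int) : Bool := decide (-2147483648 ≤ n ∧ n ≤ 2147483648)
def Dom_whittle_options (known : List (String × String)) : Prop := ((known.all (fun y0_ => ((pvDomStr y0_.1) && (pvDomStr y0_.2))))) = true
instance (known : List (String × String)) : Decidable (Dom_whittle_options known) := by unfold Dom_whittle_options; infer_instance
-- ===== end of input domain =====

-- ===== PORT A =====
-- B replaces A's inner loop of str.replace calls over the deduced wires by a single
-- character-level filter of each value against a set of deduced chars (objective: simpler).
-- Both A and B mutate the argument dict in place the same way and return it.

-- inner loop of A: for d in deduced: if d in value: value = value.replace(d, "")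
def pvReplaceAll (deduced : List String) (value : String) : String :=
  deduced.foldl
    (fun value d =>
      if PySem.Str.isIn d value then PySem.Str.replace value d "" else value)
    value

def whittle_options (known : List (String × String)) : List (String × String) :=
  let deduced := (known.map Prod.snd).filter (fun val => PySem.Str.len val == 1)
  (known.foldl
      (fun acc kv =>
        if PySem.Str.len kv.2 == 1 then acc
        else acc.insert kv.1 (pvReplaceAll deduced kv.2))
      (PySem.Dict.mk known)).items

-- ===== PORT B =====
def whittle_options_alt (known : List (String × String)) : List (String × String) :=
  let deduced : PySem.Set String :=
    PySem.Set.ofList ((known.map Prod.snd).filter (fun v => PySem.Str.len v == 1))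
  (known.foldl
      (fun acc kv =>
        if PySem.Str.len kv.2 == 1 then acc
        else
          -- ''.join(c for c in value if c not in deduced)
          acc.insert kv.1 (String.ofList (kv.2.toList.filter
            (fun c => !(PySem.Set.contains deduced (String.ofList [c]))))))
      (PySem.Dict.mk known)).items

-- ===== PRECONDITION & SPEC =====
def Spec_whittle_options (known : List (String × String)) (out : List (String × String)) : Prop := out = whittle_options_alt known
instance (known : List (String × String)) (out : List (String × String)) : Decidable (Spec_whittle_options known out) := by unfold Spec_whittle_options; infer_instance

-- ===== CLAIM (what is proved, stated in full; the proofs are below) =====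
def Claim_equal_whittle_options : Prop := ∀ (known : List (String × String)), Dom_whittle_options known → Spec_whittle_options known (whittle_options known)

-- ===== LEMMAS AND PROOFS =====

-- replace.go with a single-char pattern and empty replacement is a character filter
lemma pv_go_single (c0 : Char) : ∀ (fuel : Nat) (l acc : List Char), l.length ≤ fuel →
    PySem.Chars.replace.go [c0] [] fuel l acc = acc.reverse ++ l.filter (fun c => c != c0) := by
  intro fuel
  induction fuel with
  | zero =>
    intro l acc h
    have : l = [] := List.length_eq_zero_iff.mp (Nat.le_zero.mp h)
    subst this
    simp [PySem.Chars.replace.go]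
  | succ n ih =>
    intro l acc h
    cases l with
    | nil => simp [PySem.Chars.replace.go]
    | cons c t =>
      simp only [PySem.Chars.replace.go]
      by_cases hc : c0 = c
      · subst hc
        have hpre : List.isPrefixOf [c0] (c0 :: t) = true := by simp [List.isPrefixOf]
        simp only [hpre, if_pos]
        rw [ih _ _ (by simpa using Nat.le_of_succ_le_succ h)]
        simp
      · have hpre : List.isPrefixOf [c0] (c :: t) = false := by
          simp [List.isPrefixOf]; exact hc
        simp only [hpre]
        rw [if_neg (by simp), ih _ _ (by simpa using Nat.le_of_succ_le_succ h)]
        have hne : (c != c0) = true := by simp; exact fun he => hc he.symm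
        simp [hne]

lemma pv_replace_single (c0 : Char) (s : String) :
    PySem.Str.replace s (String.ofList [c0]) "" = String.ofList (s.toList.filter (fun c => c != c0)) := by
  unfold PySem.Str.replace
  rw [PySem.Chars.replace]
  simp only [String.toList_ofList, String.toList_empty]
  rw [if_neg (by simp)]
  rw [pv_go_single c0 s.toList.length s.toList [] le_rfl]
  simp

-- a string absent as a single-char wire means the char filter is the identity
lemma pv_filter_id (c0 : Char) (v : String) (h : PySem.Str.isIn (String.ofList [c0]) v = false) :
    v.toList.filter (fun c => c != c0) = v.toList := by
  have hnin : c0 ∉ v.toList := by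
    intro hc
    have ht : PySem.Str.isIn (String.ofList [c0]) v = true :=
      (PySem.Str.isIn_iff_infix _ _).mpr
        (by simpa using (List.singleton_infix_iff c0 v.toList).mpr hc)
    rw [h] at ht; cases ht
  exact List.filter_eq_self.mpr (fun c hc => by
    simp only [bne_iff_ne, ne_eq]
    intro hcc; exact hnin (hcc ▸ hc))

-- A's inner replace loop equals B's one-pass filter against the set of deduced wires
lemma pv_value_eq (ds : List String) (h : ∀ d ∈ ds, d.toList.length = 1) : ∀ (v : String),
    pvReplaceAll ds v
      = String.ofList (v.toList.filter
          (fun c => !(PySem.Set.contains (PySem.Set.ofList ds) (String.ofList [c])))) := by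
  induction ds with
  | nil =>
    intro v
    simp [pvReplaceAll, PySem.Set.contains, PySem.Set.ofList, PySem.Set.empty]
  | cons d t ih =>
    intro v
    obtain ⟨c0, hc0⟩ : ∃ c0, d.toList = [c0] := by
      rcases List.length_eq_one_iff.mp (h d (by simp)) with ⟨c0, hc⟩
      exact ⟨c0, hc⟩
    have hd : d = String.ofList [c0] := by
      rw [← hc0, String.ofList_toList]
    have hmem : ∀ (x : String),
        PySem.Set.contains (PySem.Set.ofList (d :: t)) x
          = (x == d || PySem.Set.contains (PySem.Set.ofList t) x) := by
      intro x
      simp only [PySem.Set.contains]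
      by_cases hx : x ∈ (d :: t)
      · rcases List.mem_cons.mp hx with h1 | h2
        · subst h1
          simp [PySem.Set.mem_ofList]
        · simp [PySem.Set.mem_ofList, h2, hx]
      · have h1 : x ≠ d := fun he => hx (he ▸ List.mem_cons_self ..)
        have h2 : x ∉ t := fun he => hx (List.mem_cons_of_mem _ he)
        simp [PySem.Set.mem_ofList, h1, h2]
    have hstep : (if PySem.Str.isIn d v then PySem.Str.replace v d "" else v)
        = String.ofList (v.toList.filter (fun c => c != c0)) := by
      by_cases hin : PySem.Str.isIn d v
      · rw [if_pos hin, hd, pv_replace_single]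
      · rw [if_neg hin, pv_filter_id c0 v (by rw [← hd]; exact Bool.eq_false_iff.mpr hin)]
        exact String.ofList_toList.symm
    have ht : ∀ d' ∈ t, d'.toList.length = 1 := fun d' hd' => h d' (List.mem_cons_of_mem _ hd')
    calc pvReplaceAll (d :: t) v
        = pvReplaceAll t (if PySem.Str.isIn d v then PySem.Str.replace v d "" else v) := rfl
      _ = pvReplaceAll t (String.ofList (v.toList.filter (fun c => c != c0))) := by rw [hstep]
      _ = String.ofList (v.toList.filter
            (fun c => !(PySem.Set.contains (PySem.Set.ofList (d :: t)) (String.ofList [c])))) := by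
          rw [ih ht]
          congr 1
          rw [String.toList_ofList, List.filter_filter]
          apply List.filter_congr
          intro c _
          rw [hmem]
          have : (String.ofList [c] == d) = (c == c0) := by
            rw [hd]
            by_cases hcc : c = c0
            · simp [hcc]
            · have h1 : String.ofList [c] ≠ String.ofList [c0] := by
                intro he; exact hcc (by simpa using congrArg String.toList he)
              simp [h1, hcc]
          rw [this]
          cases hc : (c == c0) <;> cases hs : PySem.Set.contains (PySem.Set.ofList t) (String.ofList [c]) <;> simp_all

-- ===== VERDICT (by name: the statement is the Claim_ definition above) =====
theorem whittle_options_spec : Claim_equal_whittle_options := by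
  intro known _
  unfold Spec_whittle_options whittle_options whittle_options_alt
  have hlen : ∀ d ∈ (known.map Prod.snd).filter (fun val => PySem.Str.len val == 1),
      d.toList.length = 1 := by
    intro d hd
    have := (List.mem_filter.mp hd).2
    simp only [PySem.Str.len, beq_iff_eq] at this
    exact_mod_cast this
  dsimp only
  congr 1
  apply PySem.List.foldl_congr_mem
  intro acc kv _
  by_cases h1 : (PySem.Str.len kv.2 == 1) = true
  · rw [if_pos h1, if_pos h1]
  · rw [if_neg h1, if_neg h1, pv_value_eq _ hlen]
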